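-- pv_equiv track=rewrite | github.com/diomaxer/tetrika_junior | tetrika_task3.py | append_interval
-- ===== SOURCE A (Python) =====
-- def append_interval(intervals, name):
-- 	mini_array = []
--
-- 	for i in range(len(intervals[name])):
-- 		if i % 2 == 0:
-- 			mini_array.append((intervals[name][i], name[0], 'join'))
-- 		else:
-- 			mini_array.append((intervals[name][i], name[0], 'out'))
--
-- 	return mini_array
-- ===== SOURCE B (Python) =====
-- def append_interval(intervals, name):
-- 	def pairs(arr):
-- 		if not arr:
-- 			return []
-- 		if len(arr) == 1:
-- 			return [(arr[0], name[0], 'join')]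
-- 		return [(arr[0], name[0], 'join'), (arr[1], name[0], 'out')] + pairs(arr[2:])
--
-- 	return pairs(intervals[name])
-- ===== Notes on version B (the rewrite author's own statement) =====
-- stated objective: alternative
-- what changed: Replaces the index loop over range(len) with a parity branch by a recursive function that consumes the list two elements (one start/end pair) at a time, emitting the 'join'/'out' tuples positionally.
import Mathlib
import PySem

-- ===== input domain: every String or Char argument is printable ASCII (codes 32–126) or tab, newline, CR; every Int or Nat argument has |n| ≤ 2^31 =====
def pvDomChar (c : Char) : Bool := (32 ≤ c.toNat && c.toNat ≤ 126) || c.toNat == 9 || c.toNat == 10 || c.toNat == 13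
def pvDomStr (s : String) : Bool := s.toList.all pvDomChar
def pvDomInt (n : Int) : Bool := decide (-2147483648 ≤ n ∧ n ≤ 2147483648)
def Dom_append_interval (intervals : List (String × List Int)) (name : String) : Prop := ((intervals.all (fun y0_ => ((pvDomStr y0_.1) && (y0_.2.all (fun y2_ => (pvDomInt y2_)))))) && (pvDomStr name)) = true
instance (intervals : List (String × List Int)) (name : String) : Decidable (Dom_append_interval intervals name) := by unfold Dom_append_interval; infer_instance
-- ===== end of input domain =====

-- B restructures A's index loop (parity branch on i % 2) into a recursion that
-- consumes the interval list two elements (one start/end pair) at a time.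

-- ===== PORT A =====
-- 'intervals[name]' = first-match association-list lookup (KeyError → none, excluded by Pre_);
-- 'name[0]' = PySem.Str.pyGet? name 0 (IndexError on "" → none, excluded by Pre_ when the loop runs).
def append_interval (intervals : List (String × List Int)) (name : String) : List (Int × String × String) :=
  match List.lookup name intervals with
  | none => []  -- KeyError; unreachable under Pre_
  | some xs =>
    (PySem.List.pyRange 0 (xs.length : Int) 1).foldl
      (fun acc i =>
        if PySem.Int.mod i 2 == 0 then
          acc ++ [(PySem.List.pyGetD xs i 0, ((PySem.Str.pyGet? name 0).map (fun c => String.ofList [c])).getD "", "join")]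
        else
          acc ++ [(PySem.List.pyGetD xs i 0, ((PySem.Str.pyGet? name 0).map (fun c => String.ofList [c])).getD "", "out")])
      []

-- ===== PORT B =====
def pairsB (c : String) : List Int → List (Int × String × String)
  | [] => []
  | [a] => [(a, c, "join")]
  | a :: b :: rest => (a, c, "join") :: (b, c, "out") :: pairsB c rest

def append_interval_alt (intervals : List (String × List Int)) (name : String) : List (Int × String × String) :=
  match List.lookup name intervals with
  | none => []  -- KeyError; unreachable under Pre_
  | some xs => pairsB (((PySem.Str.pyGet? name 0).map (fun c => String.ofList [c])).getD "") xs

-- ===== PRECONDITION & SPEC =====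
-- Pre_ excludes exactly where the Python A raises: a missing key (KeyError) and,
-- when the looked-up list is nonempty, an empty name (name[0] → IndexError).
def Pre_append_interval (intervals : List (String × List Int)) (name : String) : Prop :=
  (List.lookup name intervals).isSome = true ∧
  ((List.lookup name intervals).getD [] ≠ [] → name ≠ "")
instance (intervals : List (String × List Int)) (name : String) : Decidable (Pre_append_interval intervals name) := by unfold Pre_append_interval; infer_instance

def pvWitness_append_interval : (List (String × List Int)) × String := ([("ab", [1, 5, 7])], "ab")

def Spec_append_interval (intervals : List (String × List Int)) (name : String) (out : List (Int × String × String)) : Prop := out = append_interval_alt intervals name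
instance (intervals : List (String × List Int)) (name : String) (out : List (Int × String × String)) : Decidable (Spec_append_interval intervals name out) := by unfold Spec_append_interval; infer_instance

-- ===== CLAIM (what is proved, stated in full; the proofs are below) =====
def Claim_equal_append_interval : Prop := ∀ (intervals : List (String × List Int)) (name : String), Dom_append_interval intervals name → Pre_append_interval intervals name → Spec_append_interval intervals name (append_interval intervals name)

-- ===== LEMMAS AND PROOFS =====

-- A's indexed map with a parity test equals B's pairwise recursion.
theorem map_range_parity_eq_pairsB (c : String) (xs : List Int) :
    (List.range xs.length).map
      (fun k => (xs.getD k 0, c, if k % 2 == 0 then "join" else "out")) = pairsB c xs := by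
  induction xs using pairsB.induct with
  | case1 => simp [pairsB]
  | case2 a => simp [pairsB]
  | case3 a b rest ih =>
    have hlen : (a :: b :: rest).length = rest.length + 2 := by simp
    rw [hlen, List.range_succ_eq_map, List.range_succ_eq_map]
    simp only [List.map_cons, List.map_map, pairsB]
    simp only [List.cons.injEq]
    refine ⟨rfl, rfl, ?_⟩
    rw [← ih]
    apply List.map_congr_left
    intro k _
    simp [Function.comp, show k.succ.succ % 2 = k % 2 from by omega]

theorem append_interval_eq (intervals : List (String × List Int)) (name : String) :
    append_interval intervals name = append_interval_alt intervals name := by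
  unfold append_interval append_interval_alt
  cases h : List.lookup name intervals with
  | none => rfl
  | some xs =>
    set c := ((PySem.Str.pyGet? name 0).map (fun ch => String.ofList [ch])).getD "" with hc
    have hif : ∀ (acc : List (Int × String × String)) (i : Int),
        (if PySem.Int.mod i 2 == 0 then
          acc ++ [(PySem.List.pyGetD xs i 0, c, "join")]
        else
          acc ++ [(PySem.List.pyGetD xs i 0, c, "out")]) =
        acc ++ [(PySem.List.pyGetD xs i 0, c,
                 if PySem.Int.mod i 2 == 0 then "join" else "out")] := by
      intro acc i; split <;> rfl
    simp only [hif]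
    rw [PySem.List.foldl_append_singleton_eq_map
        (fun i => (PySem.List.pyGetD xs i 0, c, if PySem.Int.mod i 2 == 0 then "join" else "out"))]
    rw [PySem.List.pyRange_zero_nat xs.length, List.map_map]
    rw [← map_range_parity_eq_pairsB c xs]
    apply List.map_congr_left
    intro k _
    simp [Function.comp, PySem.List.pyGetD_natCast]
    have h2 : (2:Int) ∣ (k:Int) ↔ k % 2 = 0 := by omega
    simp only [h2]

-- ===== VERDICT (by name: the statement is the Claim_ definition above) =====
theorem append_interval_spec : Claim_equal_append_interval := by
  intro intervals name _ _
  unfold Spec_append_interval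
  exact append_interval_eq intervals name
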